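-- pv_equiv track=rewrite | github.com/SRJ-7/Reinforcement-Learning | assignment/clean_tex.py | remove_line_duplicates
-- ===== SOURCE A (Python) =====
-- def remove_line_duplicates(line):
--     # Remove exact duplicates appearing back-to-back
--     while True:
--         original = line
--         # Try different split points to find duplications
--         for i in range(1, len(line)):
--             part1 = line[:i]
--             part2 = line[i:i+len(part1)]
--             if part1 and part1 == part2:
--                 line = part1 + line[i+len(part1):]
--                 break
--         if line == original:
--             break
--     return line
-- ===== SOURCE B (Python) =====
-- def remove_line_duplicates(line):
--     # Each pass computes the Z-function of line (z[i] = length of the longest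
--     # common prefix of line and line[i:]) with the classic l/r-window algorithm,
--     # stopping at the first i with z[i] >= i, i.e. the smallest prefix that is
--     # immediately duplicated; the extension is capped at i, since reaching the
--     # cap already means a hit and below the cap the value is the exact lcp.
--     while True:
--         n = len(line)
--         z = [0]
--         l = r = 0
--         hit = None
--         for i in range(1, n):
--             k = min(r - i, z[i - l]) if i < r else 0
--             while k < i and i + k < n and line[k] == line[i + k]:
--                 k += 1
--             if i + k > r:
--                 l, r = i, i + k
--             if k >= i:
--                 hit = i
--                 break
--             z.append(k)
--         if hit is None:
--             return line
--         line = line[:hit] + line[2 * hit:]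
-- ===== Notes on version B (the rewrite author's own statement) =====
-- stated objective: alternative
-- what changed: Each pass now builds the Z-function of the line with the classic l/r-window algorithm (extension capped at i) and takes the first i with z[i] >= i, instead of slicing out and comparing a fresh prefix/copy pair for every split point; the per-pass scan is amortized O(n) instead of O(n^2), though per-pass string rebuilding still dominates on run-heavy inputs.
import Mathlib
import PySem

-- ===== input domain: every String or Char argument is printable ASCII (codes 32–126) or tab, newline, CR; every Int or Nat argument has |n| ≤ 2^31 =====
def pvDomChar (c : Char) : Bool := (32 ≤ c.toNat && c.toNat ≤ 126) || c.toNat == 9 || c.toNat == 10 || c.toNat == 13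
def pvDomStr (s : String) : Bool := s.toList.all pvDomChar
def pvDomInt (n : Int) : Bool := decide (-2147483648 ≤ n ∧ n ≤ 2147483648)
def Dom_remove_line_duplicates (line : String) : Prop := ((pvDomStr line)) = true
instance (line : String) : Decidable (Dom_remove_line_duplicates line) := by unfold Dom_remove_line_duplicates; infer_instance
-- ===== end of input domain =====

-- B replaces A's per-split slice-copy comparison by a Z-function pass (classic l/r-window
-- algorithm, extension capped at i), taking the first i with z[i] >= i; same value.

-- ===== PORT A =====
-- the for-loop over range(1, len(line)): first i whose prefix duplicates gives the new line
def pvForA (s : List Char) : List Int → Option (List Char)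
  | [] => none
  | i :: rest =>
    let part1 := PySem.List.slice s (some 0) (some i)                -- line[:i]
    let part2 := PySem.List.slice s (some i) (some (i + (part1.length : Int)))  -- line[i:i+len(part1)]
    if part1 ≠ [] ∧ part1 = part2 then
      some (part1 ++ PySem.List.slice s (some (i + (part1.length : Int))) none) -- part1 + line[i+len(part1):]
    else pvForA s rest

-- the while True loop; a successful inner break always shortens line, so line == original
-- exactly when the for-loop found no i; length+1 rounds of fuel always suffice
def pvWhileA : Nat → List Char → List Char
  | 0, s => s
  | fuel + 1, s =>
    match pvForA s (PySem.List.pyRange 1 (s.length : Int) 1) with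
    | none => s
    | some t => pvWhileA fuel t

def remove_line_duplicates (line : String) : String :=
  String.ofList (pvWhileA (line.toList.length + 1) line.toList)

-- ===== PORT B =====
-- Source B's inner while loop 'while k < i and i + k < n and line[k] == line[i+k]: k += 1'
-- on t = line[i:] with cap c = i (so i + k < n is k < t.length, and line[i+k] is t[k];
-- both reads are in bounds, getD is exact)
def pvExt (c : Nat) (s t : List Char) (k : Nat) : Nat :=
  if _h : k < c ∧ k < t.length ∧ s.getD k ' ' = t.getD k ' ' then pvExt c s t (k + 1) else k
termination_by c - k
decreasing_by omega

-- the for-loop over range(1, n) carrying the Z-function state (l, r window, z list);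
-- returns the first i with z[i] = k >= i (the 'hit'), appending k to z otherwise
def pvZfor (s : List Char) : List Nat → Nat → Nat → List Nat → Option Nat
  | [], _, _, _ => none
  | i :: rest, l, r, z =>
    let k0 := if i < r then min (r - i) (z.getD (i - l) 0) else 0
    let k := pvExt i s (s.drop i) k0
    let l' := if r < i + k then i else l
    let r' := if r < i + k then i + k else r
    if i ≤ k then some i
    else pvZfor s rest l' r' (z ++ [k])

-- the while True loop: drop the duplicate 'line = line[:hit] + line[2*hit:]' until no hit
def pvWhileB : Nat → List Char → List Char
  | 0, s => s
  | fuel + 1, s =>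
    match pvZfor s (List.range' 1 (s.length - 1)) 0 0 [0] with
    | none => s
    | some i => pvWhileB fuel (s.take i ++ s.drop (2 * i))

def remove_line_duplicates_alt (line : String) : String :=
  String.ofList (pvWhileB (line.toList.length + 1) line.toList)

-- ===== PRECONDITION & SPEC =====
def Spec_remove_line_duplicates (line : String) (out : String) : Prop := out = remove_line_duplicates_alt line
instance (line : String) (out : String) : Decidable (Spec_remove_line_duplicates line out) := by unfold Spec_remove_line_duplicates; infer_instance

-- ===== CLAIM (what is proved, stated in full; the proofs are below) =====
def Claim_equal_remove_line_duplicates : Prop := ∀ (line : String), Dom_remove_line_duplicates line → Spec_remove_line_duplicates line (remove_line_duplicates line)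

-- ===== LEMMAS AND PROOFS =====

-- specification of both sides' matching: length of the longest common prefix
def pvLcp : List Char → List Char → Nat
  | a :: as, b :: bs => if a = b then pvLcp as bs + 1 else 0
  | _, _ => 0

lemma lcp_ge_iff (k : Nat) (a b : List Char) :
    k ≤ pvLcp a b ↔ (a.take k = b.take k ∧ k ≤ a.length ∧ k ≤ b.length) := by
  induction k generalizing a b with
  | zero => simp
  | succ k ih =>
    cases a with
    | nil => simp [pvLcp]
    | cons x as =>
      cases b with
      | nil => simp [pvLcp]
      | cons y bs =>
        by_cases hxy : x = y
        · subst hxy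
          simp [pvLcp, ih as bs]
        · simp [pvLcp, hxy]

lemma lcp_le_right (a b : List Char) : pvLcp a b ≤ b.length := by
  induction a generalizing b with
  | nil => simp [pvLcp]
  | cons x as ih =>
    cases b with
    | nil => simp [pvLcp]
    | cons y bs =>
      by_cases hxy : x = y
      · simpa [pvLcp, hxy] using ih bs
      · simp [pvLcp, hxy]

-- A's capped matcher is min-with-cap of the lcp (used to bridge A's test to pvLcp)
def pvMatch : Nat → List Char → List Char → Nat
  | cap + 1, a :: as, b :: bs => if a = b then pvMatch cap as bs + 1 else 0
  | _, _, _ => 0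

lemma pvMatch_eq_cap_iff (c : Nat) (a b : List Char) :
    pvMatch c a b = c ↔ (a.take c = b.take c ∧ c ≤ a.length ∧ c ≤ b.length) := by
  induction c generalizing a b with
  | zero => simp [pvMatch]
  | succ c ih =>
    cases a with
    | nil => simp [pvMatch]
    | cons x as =>
      cases b with
      | nil => simp [pvMatch]
      | cons y bs =>
        by_cases hxy : x = y
        · subst hxy
          simp [pvMatch, ih as bs]
        · simp [pvMatch, hxy]

-- A's duplication test at split point i equals 'i ≤ lcp of line with line[i:]'
lemma condA_iff (s : List Char) (i : Nat) (h1 : 1 ≤ i) (h2 : i < s.length) :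
    (s.take i ≠ [] ∧ s.take i = (s.drop i).take i) ↔ pvMatch i s (s.drop i) = i := by
  rw [pvMatch_eq_cap_iff]
  constructor
  · rintro ⟨-, heq⟩
    have hlen := congrArg List.length heq
    rw [List.length_take, List.length_take, List.length_drop] at hlen
    refine ⟨heq, by omega, ?_⟩
    rw [List.length_drop]
    omega
  · rintro ⟨heq, -, -⟩
    refine ⟨?_, heq⟩
    simp only [ne_eq, List.take_eq_nil_iff, not_or]
    exact ⟨by omega, fun h => by rw [h] at h2; simp at h2⟩

lemma forA_eq (s : List Char) (L : List Nat) (hL : ∀ j ∈ L, 1 ≤ j ∧ j < s.length) :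
    pvForA s (L.map (fun (k : Nat) => (k : Int))) =
      (L.find? (fun i => pvMatch i s (s.drop i) == i)).map
        (fun i => s.take i ++ s.drop (2 * i)) := by
  induction L with
  | nil => simp [pvForA]
  | cons i L ih =>
    obtain ⟨hi1, hi2⟩ := hL i (by simp)
    have hlen : (PySem.List.slice s (some 0) (some (i : Int))).length = i := by
      simp [PySem.List.slice_zero_start, PySem.List.slice_to_natCast, List.length_take]
      omega
    rw [List.map_cons, pvForA, List.find?_cons]
    simp only [hlen]
    have hcast : ((i : Int) + (i : Int)) = ((2 * i : Nat) : Int) := by push_cast; ring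
    by_cases hc : pvMatch i s (s.drop i) = i
    · have hA : s.take i ≠ [] ∧ s.take i = (s.drop i).take i := (condA_iff s i hi1 hi2).mpr hc
      have hb : (pvMatch i s (s.drop i) == i) = true := by simpa using hc
      rw [if_pos]
      · rw [hb, hcast, PySem.List.slice_from_natCast]
        simp [PySem.List.slice_zero_start, PySem.List.slice_to_natCast]
      · simpa [PySem.List.slice_zero_start, PySem.List.slice_to_natCast,
          PySem.List.slice_natCast_add] using hA
    · have hA := (condA_iff s i hi1 hi2).not.mpr hc
      have hb : (pvMatch i s (s.drop i) == i) = false := by simpa using hc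
      rw [if_neg]
      · rw [hb]
        exact ih (fun j hj => hL j (by simp [hj]))
      · simpa [PySem.List.slice_zero_start, PySem.List.slice_to_natCast,
          PySem.List.slice_natCast_add] using hA

-- the capped extension loop computes min(cap, lcp) from any sound starting point below cap
lemma pvExt_eq (c : Nat) (s t : List Char) (k : Nat) (hts : t.length ≤ s.length)
    (hk : k ≤ pvLcp s t) (hkc : k ≤ c) : pvExt c s t k = min c (pvLcp s t) := by
  rw [pvExt]
  split
  · rename_i h
    obtain ⟨hkc', hkt, heq⟩ := h
    refine pvExt_eq c s t (k + 1) hts ?_ (by omega)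
    rw [lcp_ge_iff] at hk ⊢
    obtain ⟨htk, hks, hkt'⟩ := hk
    refine ⟨?_, by omega, by omega⟩
    have hks' : k < s.length := by omega
    rw [List.take_add_one, List.take_add_one, htk]
    congr 1
    rw [List.getElem?_eq_getElem hks', List.getElem?_eq_getElem hkt]
    have := heq
    rw [List.getD_eq_getElem _ _ hks', List.getD_eq_getElem _ _ hkt] at this
    simp [this]
  · rename_i h
    rw [Classical.not_and_iff_not_or_not] at h
    rcases h with h | h
    · -- k = c: the cap is reached, and c ≤ lcp
      omega
    · rw [Classical.not_and_iff_not_or_not] at h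
      rcases h with h | h
      · have := lcp_le_right s t
        omega
      · have hlk : pvLcp s t ≤ k := by
          by_contra hne
          have hlt : k + 1 ≤ pvLcp s t := by omega
          rw [lcp_ge_iff] at hlt
          obtain ⟨htk, hks, hkt⟩ := hlt
          apply h
          have h1 : (s.take (k + 1))[k]'(by simp; omega) = (t.take (k + 1))[k]'(by simp; omega) := by
            simp [htk]
          rw [List.getElem_take, List.getElem_take] at h1
          rw [List.getD_eq_getElem _ _ (by omega), List.getD_eq_getElem _ _ (by omega)]
          exact h1
        omega
termination_by c - k
decreasing_by omega

-- soundness of the window seed: min(r-i, z[i-l]) char matches are guaranteed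
lemma window_le (s : List Char) (l r i : Nat) (hli : l < i) (hir : i < r)
    (hr : r ≤ s.length) (hwin : r - l ≤ pvLcp s (s.drop l)) :
    min (r - i) (pvLcp s (s.drop (i - l))) ≤ pvLcp s (s.drop i) := by
  set d := i - l with hd
  set m := min (r - i) (pvLcp s (s.drop d)) with hm
  have hm1 : m ≤ r - i := by omega
  have hm2 : m ≤ pvLcp s (s.drop d) := by omega
  rw [lcp_ge_iff]
  have hdl : (s.drop l).length = s.length - l := by simp
  refine ⟨?_, by omega, by simp; omega⟩
  -- from the window: s[p] = s[l+p] for p < r - l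
  rw [lcp_ge_iff] at hwin
  obtain ⟨hwtk, -, -⟩ := hwin
  rw [lcp_ge_iff] at hm2
  obtain ⟨hdk, hms, hmd⟩ := hm2
  have hmdlen : m ≤ s.length - d := by simpa using hmd
  apply List.ext_getElem
  · simp; omega
  · intro t ht1 ht2
    rw [List.length_take] at ht1
    have htm : t < m := by omega
    have q1 : s[t]? = s[d + t]? := by
      have h := congrArg (fun xs => xs[t]?) hdk
      simpa [List.getElem?_take, List.getElem?_drop, htm] using h
    have q2 : s[d + t]? = s[l + (d + t)]? := by
      have h := congrArg (fun xs => xs[d + t]?) hwtk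
      simpa [List.getElem?_take, List.getElem?_drop, show d + t < r - l by omega] using h
    have q3 : s[t]? = s[i + t]? := by
      rw [q1, q2, show l + (d + t) = i + t by omega]
    rw [List.getElem_take, List.getElem_take, List.getElem_drop]
    rw [List.getElem?_eq_getElem (show t < s.length by omega),
      List.getElem?_eq_getElem (show i + t < s.length by omega)] at q3
    exact Option.some.inj q3

-- the Z-loop returns exactly the first i in the remaining range with i ≤ lcp(s, s[i:])
lemma zfor_eq (s : List Char) (m l r : Nat) (z : List Nat)
    (hm1 : 1 ≤ m) (hzlen : z.length = m)
    (hz : ∀ j, 1 ≤ j → j < m → z.getD j 0 = pvLcp s (s.drop j))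
    (hlr : (l = 0 ∧ r = 0) ∨ (1 ≤ l ∧ l < m ∧ r ≤ s.length ∧ r - l ≤ pvLcp s (s.drop l))) :
    pvZfor s (List.range' m (s.length - m)) l r z
      = (List.range' m (s.length - m)).find? (fun i => decide (i ≤ pvLcp s (s.drop i))) := by
  rcases Nat.lt_or_ge m s.length with hms | hms
  · have hrange : List.range' m (s.length - m) = m :: List.range' (m + 1) (s.length - (m + 1)) := by
      rw [show s.length - m = (s.length - (m + 1)) + 1 by omega, List.range'_succ]
    rw [hrange, pvZfor, List.find?_cons]
    have hk0 : (if m < r then min (r - m) (z.getD (m - l) 0) else 0) ≤ pvLcp s (s.drop m) := by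
      split
      · rename_i hmr
        rcases hlr with ⟨-, hr0⟩ | ⟨hl1, hlm, hrs, hwin⟩
        · omega
        · rw [hz (m - l) (by omega) (by omega)]
          exact window_le s l r m hlm hmr hrs hwin
      · omega
    have hlcp : pvLcp s (s.drop m) ≤ s.length - m := by
      have := lcp_le_right s (s.drop m)
      simpa using this
    by_cases hki : (if m < r then min (r - m) (z.getD (m - l) 0) else 0) < m
    · -- the seed is below the cap: the extension yields min m (lcp)
      have hk : pvExt m s (s.drop m) (if m < r then min (r - m) (z.getD (m - l) 0) else 0)
          = min m (pvLcp s (s.drop m)) :=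
        pvExt_eq m s (s.drop m) _ (by simp) hk0 (by omega)
      by_cases hc : m ≤ pvLcp s (s.drop m)
      · have hdt : (decide (m ≤ pvLcp s (s.drop m))) = true := by simp [hc]
        simp only [hk, if_pos (show m ≤ min m (pvLcp s (s.drop m)) by omega), hdt]
      · have hmin : min m (pvLcp s (s.drop m)) = pvLcp s (s.drop m) := by omega
        have hz' : ∀ j, 1 ≤ j → j < m + 1 →
            (z ++ [pvLcp s (s.drop m)]).getD j 0 = pvLcp s (s.drop j) := by
          intro j hj1 hj2
          rcases Nat.lt_or_ge j m with hjm | hjm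
          · rw [List.getD_eq_getElem?_getD, List.getElem?_append_left (by omega),
              ← List.getD_eq_getElem?_getD]
            exact hz j hj1 hjm
          · have hjm' : j = m := by omega
            subst hjm'
            rw [List.getD_eq_getElem?_getD, List.getElem?_append_right (by omega)]
            simp [hzlen]
        have hdf : (decide (m ≤ pvLcp s (s.drop m))) = false := by simp [hc]
        by_cases hrk : r < m + pvLcp s (s.drop m)
        · simp only [hk, hmin, if_neg hc, hdf, if_pos hrk]
          exact zfor_eq s (m + 1) m (m + pvLcp s (s.drop m)) _ (by omega) (by simp [hzlen]) hz'
            (Or.inr ⟨by omega, by omega, by omega, by omega⟩)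
        · simp only [hk, hmin, if_neg hc, hdf, if_neg hrk]
          refine zfor_eq s (m + 1) l r _ (by omega) (by simp [hzlen]) hz' ?_
          rcases hlr with ⟨hl0, hr0⟩ | ⟨hl1, hlm, hrs, hwin⟩
          · exact Or.inl ⟨hl0, hr0⟩
          · exact Or.inr ⟨hl1, by omega, hrs, hwin⟩
    · -- the seed already reaches the cap: the while loop does not run and it is a hit
      have hk : pvExt m s (s.drop m) (if m < r then min (r - m) (z.getD (m - l) 0) else 0)
          = (if m < r then min (r - m) (z.getD (m - l) 0) else 0) := by
        rw [pvExt]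
        exact dif_neg (fun h => hki h.1)
      have hhit : m ≤ (if m < r then min (r - m) (z.getD (m - l) 0) else 0) := by omega
      have hc : m ≤ pvLcp s (s.drop m) := le_trans hhit hk0
      have hdt : (decide (m ≤ pvLcp s (s.drop m))) = true := by simp [hc]
      simp only [hk, if_pos hhit, hdt]
  · rw [show s.length - m = 0 by omega]
    simp [pvZfor]
termination_by s.length - m
decreasing_by all_goals omega

lemma match_pred_eq (s : List Char) :
    (fun i => pvMatch i s (s.drop i) == i) = (fun i => decide (i ≤ pvLcp s (s.drop i))) := by
  funext i
  have h1 := pvMatch_eq_cap_iff i s (s.drop i)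
  have h2 := lcp_ge_iff i s (s.drop i)
  by_cases hc : i ≤ pvLcp s (s.drop i)
  · simp [hc, h1.mpr (h2.mp hc)]
  · have : ¬ pvMatch i s (s.drop i) = i := fun h => hc (h2.mpr (h1.mp h))
    simp [hc, this]

-- one round of A's for-loop equals one round of B's Z-pass
lemma step_eq (s : List Char) :
    pvForA s (PySem.List.pyRange 1 (s.length : Int) 1) =
      (pvZfor s (List.range' 1 (s.length - 1)) 0 0 [0]).map
        (fun i => s.take i ++ s.drop (2 * i)) := by
  have hrange : PySem.List.pyRange 1 (s.length : Int) 1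
      = (List.range' 1 (s.length - 1)).map (fun (k : Nat) => (k : Int)) := by
    rw [PySem.List.pyRange_one, List.range'_eq_map_range, List.map_map]
    have : ((s.length : Int) - 1).toNat = s.length - 1 := by omega
    rw [this]
    apply List.map_congr_left
    intro k _
    simp [Function.comp]
  rw [hrange, forA_eq, match_pred_eq,
    zfor_eq s 1 0 0 [0] (by omega) (by simp) (by intro j h1 h2; omega) (by left; exact ⟨rfl, rfl⟩)]
  intro j hj
  have := List.mem_range'_1.mp hj
  omega

lemma while_eq (fuel : Nat) (s : List Char) : pvWhileA fuel s = pvWhileB fuel s := by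
  induction fuel generalizing s with
  | zero => rfl
  | succ fuel ih =>
    rw [pvWhileA, pvWhileB, step_eq]
    cases pvZfor s (List.range' 1 (s.length - 1)) 0 0 [0] with
    | none => rfl
    | some i => simp [ih]

-- ===== VERDICT (by name: the statement is the Claim_ definition above) =====
theorem remove_line_duplicates_spec : Claim_equal_remove_line_duplicates := by
  intro line _
  unfold Spec_remove_line_duplicates remove_line_duplicates remove_line_duplicates_alt
  rw [while_eq]
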